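-- pv_equiv track=rewrite | github.com/Kevinwu901113/ano-rag | vector_store/hybrid_retriever.py | _source_breakdown
-- ===== SOURCE A (Python) =====
-- from typing import Any, Dict, Iterable, List, Optional, Sequence, Tuple
--
-- def _source_breakdown(entries: Iterable[Dict[str, Any]]) -> Dict[str, int]:
--     bm25_only = vector_only = both = 0
--     for entry in entries:
--         sources = entry.get("sources", set())
--         if "bm25" in sources and "vector" in sources:
--             both += 1
--         elif "bm25" in sources:
--             bm25_only += 1
--         elif "vector" in sources:
--             vector_only += 1
--     return {
--         "bm25_only": bm25_only,
--         "vector_only": vector_only,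
--         "both": both,
--     }
-- ===== SOURCE B (Python) =====
-- def _source_breakdown(entries):
--     entries = list(entries)
--
--     def has(entry, name):
--         return name in entry.get("sources", set())
--
--     return {
--         "bm25_only": sum(1 for e in entries if has(e, "bm25") and not has(e, "vector")),
--         "vector_only": sum(1 for e in entries if has(e, "vector") and not has(e, "bm25")),
--         "both": sum(1 for e in entries if has(e, "bm25") and has(e, "vector")),
--     }
-- ===== Notes on version B (the rewrite author's own statement) =====
-- stated objective: idiomatic
-- what changed: Replaced the single stateful branching loop over three mutable counters with three independent filtered-count scans (sum of generator expressions), one per output key.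
import Mathlib
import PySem

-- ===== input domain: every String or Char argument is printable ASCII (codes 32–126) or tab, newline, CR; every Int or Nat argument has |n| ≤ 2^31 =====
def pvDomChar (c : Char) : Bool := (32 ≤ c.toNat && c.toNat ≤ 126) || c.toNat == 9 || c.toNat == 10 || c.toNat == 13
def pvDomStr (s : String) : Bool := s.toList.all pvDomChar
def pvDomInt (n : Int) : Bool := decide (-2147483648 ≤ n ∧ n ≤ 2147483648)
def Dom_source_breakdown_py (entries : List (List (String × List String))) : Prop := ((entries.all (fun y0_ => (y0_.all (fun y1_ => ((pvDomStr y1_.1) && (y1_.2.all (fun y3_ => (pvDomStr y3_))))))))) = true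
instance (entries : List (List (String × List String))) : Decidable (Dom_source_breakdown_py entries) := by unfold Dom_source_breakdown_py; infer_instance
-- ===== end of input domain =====

-- B replaces A's single stateful branching loop with three independent filtered counts (idiomatic decomposition).
-- ===== PORT A =====
-- loop body of A: st = (bm25_only, vector_only, both)
def sbStep (st : Int × Int × Int) (entry : List (String × List String)) : Int × Int × Int :=
  let sources := (entry.lookup "sources").getD []
  if sources.contains "bm25" && sources.contains "vector" then (st.1, st.2.1, st.2.2 + 1)
  else if sources.contains "bm25" then (st.1 + 1, st.2.1, st.2.2)
  else if sources.contains "vector" then (st.1, st.2.1 + 1, st.2.2)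
  else st

def source_breakdown_py (entries : List (List (String × List String))) : List (String × Int) :=
  let st := entries.foldl sbStep (0, 0, 0)
  [("bm25_only", st.1), ("vector_only", st.2.1), ("both", st.2.2)]

-- ===== PORT B =====
def sbHas (entry : List (String × List String)) (name : String) : Bool :=
  ((entry.lookup "sources").getD []).contains name

def source_breakdown_py_alt (entries : List (List (String × List String))) : List (String × Int) :=
  [("bm25_only", (entries.countP (fun e => sbHas e "bm25" && !sbHas e "vector") : Int)),
   ("vector_only", (entries.countP (fun e => sbHas e "vector" && !sbHas e "bm25") : Int)),
   ("both", (entries.countP (fun e => sbHas e "bm25" && sbHas e "vector") : Int))]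

-- ===== PRECONDITION & SPEC =====
def Spec_source_breakdown_py (entries : List (List (String × List String))) (out : List (String × Int)) : Prop := out = source_breakdown_py_alt entries
instance (entries : List (List (String × List String))) (out : List (String × Int)) : Decidable (Spec_source_breakdown_py entries out) := by unfold Spec_source_breakdown_py; infer_instance

-- ===== CLAIM (what is proved, stated in full; the proofs are below) =====
def Claim_equal_source_breakdown_py : Prop := ∀ (entries : List (List (String × List String))), Dom_source_breakdown_py entries → Spec_source_breakdown_py entries (source_breakdown_py entries)

-- ===== LEMMAS AND PROOFS =====

-- ===== VERDICT (by name: the statement is the Claim_ definition above) =====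
lemma sb_fold (entries : List (List (String × List String))) (a b c : Int) :
    entries.foldl sbStep (a, b, c)
    = (a + (entries.countP (fun e => sbHas e "bm25" && !sbHas e "vector") : Int),
       b + (entries.countP (fun e => sbHas e "vector" && !sbHas e "bm25") : Int),
       c + (entries.countP (fun e => sbHas e "bm25" && sbHas e "vector") : Int)) := by
  induction entries generalizing a b c with
  | nil => simp
  | cons e es ih =>
    rw [List.foldl_cons]
    cases h1 : ((e.lookup "sources").getD []).contains "bm25" <;>
      cases h2 : ((e.lookup "sources").getD []).contains "vector" <;>
        simp only [sbStep, sbHas, List.countP_cons, h1, h2, Bool.and_true, Bool.and_false,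
          Bool.not_true, Bool.not_false, if_true, if_false,
          Bool.false_eq_true, ih, Prod.mk.injEq, Nat.cast_add, Nat.cast_one, Nat.cast_zero] <;>
        refine ⟨by omega, by omega, by omega⟩

theorem source_breakdown_py_spec : Claim_equal_source_breakdown_py := by
  intro entries _
  unfold Spec_source_breakdown_py source_breakdown_py source_breakdown_py_alt
  rw [sb_fold]
  simp
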